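-- pv_equiv track=rewrite | github.com/MOKIMOKI0312/bachlor-thesis | AI-Data-Center-Analysis_migration_bundle_20260311/tools/m1/1_add_tes_obj.py | _next_output_variable_key
-- ===== SOURCE A (Python) =====
-- def _next_output_variable_key(data: dict) -> int:
--     """Find smallest positive integer N such that 'Output:Variable N' is unused."""
--     existing = data.get("Output:Variable", {})
--     used = set()
--     for k in existing:
--         # patterns like "Output:Variable 3", "Output:Variable 19"
--         parts = k.split()
--         if len(parts) >= 2 and parts[-1].isdigit():
--             used.add(int(parts[-1]))
--     n = 1
--     while n in used:
--         n += 1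
--     return n
-- ===== SOURCE B (Python) =====
-- def _next_output_variable_key(data: dict) -> int:
--     """Find smallest positive integer N such that 'Output:Variable N' is unused."""
--     existing = data.get("Output:Variable", {})
--     used = []
--     for k in existing:
--         parts = k.split()
--         if len(parts) >= 2 and parts[-1].isdigit():
--             used.append(int(parts[-1]))
--     candidate = 1
--     for v in sorted(used):
--         if v < candidate:
--             continue  # duplicate of an already-passed value
--         if v == candidate:
--             candidate += 1
--         else:
--             break  # gap found
--     return candidate
-- ===== Notes on version B (the rewrite author's own statement) =====
-- stated objective: alternative
-- what changed: Replaced the unbounded membership-probe while-loop over a set by collecting the used integers into a list, sorting it, and finding the first gap in one scan with a candidate counter.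
import Mathlib
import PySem

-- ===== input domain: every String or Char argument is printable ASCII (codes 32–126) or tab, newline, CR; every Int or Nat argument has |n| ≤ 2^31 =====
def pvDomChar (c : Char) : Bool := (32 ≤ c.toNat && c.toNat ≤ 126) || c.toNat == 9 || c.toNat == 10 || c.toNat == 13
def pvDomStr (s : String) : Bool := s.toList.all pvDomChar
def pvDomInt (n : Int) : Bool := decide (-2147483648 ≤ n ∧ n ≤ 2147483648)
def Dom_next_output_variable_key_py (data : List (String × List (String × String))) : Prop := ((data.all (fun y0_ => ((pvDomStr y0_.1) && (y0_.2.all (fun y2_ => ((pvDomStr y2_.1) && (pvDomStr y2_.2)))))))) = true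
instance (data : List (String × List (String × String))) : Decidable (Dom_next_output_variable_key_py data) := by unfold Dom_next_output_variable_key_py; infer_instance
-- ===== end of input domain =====

-- B replaces A's unbounded set-membership probe loop by sort-then-single-scan for the first gap (objective: alternative).

-- ===== PORT A =====
-- while n in used: n += 1   (terminates: the elements of `used` that are ≥ n strictly decrease)
def nov_whileA (used : List Int) (n : Int) : Int :=
  if n ∈ used then nov_whileA used (n + 1) else n
termination_by (used.filter (fun x => n ≤ x)).length
decreasing_by
  rename_i h
  have hsub : List.Sublist (used.filter (fun x => decide (n + 1 ≤ x))) (used.filter (fun x => decide (n ≤ x))) :=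
    List.monotone_filter_right _ (by intro a ha; simp at ha ⊢; omega)
  have hle := hsub.length_le
  rcases lt_or_eq_of_le hle with hlt | heq
  · exact hlt
  · exfalso
    have := hsub.eq_of_length heq
    have hn : n ∈ used.filter (fun x => decide (n ≤ x)) := by simp [h]
    rw [← this] at hn
    simp at hn

def next_output_variable_key_py (data : List (String × List (String × String))) : Int :=
  let existing := (PySem.Dict.mk data).getD "Output:Variable" []
  -- for k in existing: parts = k.split(); if len(parts) >= 2 and parts[-1].isdigit(): used.add(int(parts[-1]))
  -- parts[-1] ported with pyGetD "" (total form: len(parts) >= 2 guards it); int(parts[-1]) with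
  -- (ofStr? _).getD 0 (total form: isdigit guarantees `some`).
  let used : PySem.Set Int := existing.foldl (fun used kv =>
    let parts := PySem.Str.split₀ kv.1
    if parts.length ≥ 2 && PySem.Str.strIsdigit (PySem.List.pyGetD parts (-1) "") then
      PySem.Set.add used ((PySem.Int.ofStr? (PySem.List.pyGetD parts (-1) "")).getD 0)
    else used) PySem.Set.empty
  nov_whileA used 1

-- ===== PORT B =====
-- for v in sorted(used): skip below candidate, bump on equal, break on gap
def nov_scanB : List Int → Int → Int
  | [], c => c
  | v :: rest, c =>
    if v < c then nov_scanB rest c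
    else if v = c then nov_scanB rest (c + 1)
    else c

def next_output_variable_key_py_alt (data : List (String × List (String × String))) : Int :=
  let existing := (PySem.Dict.mk data).getD "Output:Variable" []
  let used : List Int := existing.foldl (fun used kv =>
    let parts := PySem.Str.split₀ kv.1
    if parts.length ≥ 2 && PySem.Str.strIsdigit (PySem.List.pyGetD parts (-1) "") then
      used ++ [(PySem.Int.ofStr? (PySem.List.pyGetD parts (-1) "")).getD 0]
    else used) []
  nov_scanB (PySem.List.sorted used (fun x => x) false) 1

-- ===== PRECONDITION & SPEC =====
def Spec_next_output_variable_key_py (data : List (String × List (String × String))) (out : Int) : Prop := out = next_output_variable_key_py_alt data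
instance (data : List (String × List (String × String))) (out : Int) : Decidable (Spec_next_output_variable_key_py data out) := by unfold Spec_next_output_variable_key_py; infer_instance

-- ===== CLAIM (what is proved, stated in full; the proofs are below) =====
def Claim_equal_next_output_variable_key_py : Prop := ∀ (data : List (String × List (String × String))), Dom_next_output_variable_key_py data → Spec_next_output_variable_key_py data (next_output_variable_key_py data)

-- ===== LEMMAS AND PROOFS =====

-- the two folds collect the same integers up to membership
theorem nov_fold_mem (l : List (String × String)) :
    ∀ (s : PySem.Set Int) (u : List Int), (∀ x, x ∈ s ↔ x ∈ u) →
    ∀ x, x ∈ l.foldl (fun used kv =>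
        let parts := PySem.Str.split₀ kv.1
        if parts.length ≥ 2 && PySem.Str.strIsdigit (PySem.List.pyGetD parts (-1) "") then
          PySem.Set.add used ((PySem.Int.ofStr? (PySem.List.pyGetD parts (-1) "")).getD 0)
        else used) s
      ↔ x ∈ l.foldl (fun used kv =>
        let parts := PySem.Str.split₀ kv.1
        if parts.length ≥ 2 && PySem.Str.strIsdigit (PySem.List.pyGetD parts (-1) "") then
          used ++ [(PySem.Int.ofStr? (PySem.List.pyGetD parts (-1) "")).getD 0]
        else used) u := by
  induction l with
  | nil => intro s u h x; simpa using h x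
  | cons kv rest ih =>
    intro s u h x
    simp only [List.foldl_cons]
    split
    · exact ih _ _ (fun y => by simp [PySem.Set.mem_add, h y, or_comm]) x
    · exact ih _ _ h x

-- A's while-loop only depends on which integers ≥ n are in the list
theorem nov_whileA_congr (u u' : List Int) (n : Int)
    (h : ∀ k, n ≤ k → (k ∈ u ↔ k ∈ u')) : nov_whileA u n = nov_whileA u' n := by
  fun_induction nov_whileA u n with
  | case1 n hmem ih =>
    rw [ih (fun k hk => h k (by omega))]
    conv_rhs => rw [nov_whileA]
    rw [if_pos ((h n le_rfl).1 hmem)]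
  | case2 n hmem =>
    rw [nov_whileA, if_neg (fun hc => hmem ((h n le_rfl).2 hc))]

-- on a nondecreasing list, B's scan computes A's while-loop
theorem nov_scan_eq_while (s : List Int) (hs : s.Pairwise (· ≤ ·)) :
    ∀ c, nov_scanB s c = nov_whileA s c := by
  induction s with
  | nil => intro c; rw [nov_scanB, nov_whileA]; simp
  | cons v rest ih =>
    rcases List.pairwise_cons.mp hs with ⟨hv, hrest⟩
    intro c
    rw [nov_scanB]
    split
    · rename_i hlt
      rw [ih hrest c, nov_whileA_congr rest (v :: rest) c
        (fun k hk => by simp; intro hkv; omega)]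
    · split
      · rename_i hne heq
        subst heq
        rw [ih hrest (v + 1),
          nov_whileA_congr rest (v :: rest) (v + 1) (fun k hk => by simp; omega)]
        conv_rhs => rw [nov_whileA]
        rw [if_pos (by simp)]
      · rename_i hlt heq
        rw [nov_whileA, if_neg]
        simp only [List.mem_cons, not_or]
        constructor
        · omega
        · intro hc; have := hv c hc; omega

-- ===== VERDICT (by name: the statement is the Claim_ definition above) =====
theorem next_output_variable_key_py_spec : Claim_equal_next_output_variable_key_py := by
  unfold Claim_equal_next_output_variable_key_py
  intro data _
  unfold Spec_next_output_variable_key_py next_output_variable_key_py next_output_variable_key_py_alt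
  set existing := (PySem.Dict.mk data).getD "Output:Variable" [] with hex
  simp only []
  set u : List Int := existing.foldl (fun used kv =>
    let parts := PySem.Str.split₀ kv.1
    if parts.length ≥ 2 && PySem.Str.strIsdigit (PySem.List.pyGetD parts (-1) "") then
      used ++ [(PySem.Int.ofStr? (PySem.List.pyGetD parts (-1) "")).getD 0]
    else used) [] with hu
  set s : PySem.Set Int := existing.foldl (fun used kv =>
    let parts := PySem.Str.split₀ kv.1
    if parts.length ≥ 2 && PySem.Str.strIsdigit (PySem.List.pyGetD parts (-1) "") then
      PySem.Set.add used ((PySem.Int.ofStr? (PySem.List.pyGetD parts (-1) "")).getD 0)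
    else used) PySem.Set.empty with hs
  have hmem : ∀ x, x ∈ s ↔ x ∈ u :=
    nov_fold_mem existing PySem.Set.empty [] (by simp [PySem.Set.empty])
  rw [nov_scan_eq_while _ (PySem.List.sorted_pairwise u (fun x => x) )]
  rw [nov_whileA_congr s u 1 (fun k _ => hmem k)]
  exact nov_whileA_congr u (PySem.List.sorted u (fun x => x) false) 1
    (fun k _ => (PySem.List.mem_sorted u (fun x => x) false k).symm)
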